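-- pv_equiv track=rewrite | github.com/HarizDharma/quantum_development_test | fibo_wizard_api_with_charts.py | normalize_timeframe
-- ===== SOURCE A (Python) =====
-- def normalize_timeframe(tf: str) -> str:
--     tf = tf.strip().lower()
--     if tf.isdigit():
--         return f"{tf}m"
--     allowed_units = ("m","h","d","w")
--     if tf and tf[-1] in allowed_units and tf[:-1].isdigit():
--         return tf
--     num = "".join([c for c in tf if c.isdigit()])
--     if num:
--         return f"{num}m"
--     raise ValueError(f"Timeframe tidak valid: {tf}. Gunakan 5m/15m/1h/4h/1d.")
-- ===== SOURCE B (Python) =====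
-- def normalize_timeframe(tf: str) -> str:
--     s = tf.strip().lower()
--     # single left-to-right pass with a 4-state machine:
--     # 0 start, 1 digits so far, 2 digits followed by exactly one unit, 3 pattern broken
--     state = 0
--     digits = []
--     for c in s:
--         if c.isdigit():
--             digits.append(c)
--             state = 1 if state in (0, 1) else 3
--         elif c in "mhdw" and state == 1:
--             state = 2
--         else:
--             state = 3
--     if state == 1:
--         return "".join(digits) + "m"
--     if state == 2:
--         return s
--     if digits:
--         return "".join(digits) + "m"
--     raise ValueError(f"Timeframe tidak valid: {s}. Gunakan 5m/15m/1h/4h/1d.")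
-- ===== Notes on version B (the rewrite author's own statement) =====
-- stated objective: alternative
-- what changed: B replaces A's staged whole-string tests (isdigit on the string, last-char + sliced-prefix isdigit, then a digit-filter pass) by a single left-to-right pass of a 4-state finite-state machine that accumulates the digits and classifies the string (all digits / digits+one unit / broken) in one traversal with no slicing.
import Mathlib
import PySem

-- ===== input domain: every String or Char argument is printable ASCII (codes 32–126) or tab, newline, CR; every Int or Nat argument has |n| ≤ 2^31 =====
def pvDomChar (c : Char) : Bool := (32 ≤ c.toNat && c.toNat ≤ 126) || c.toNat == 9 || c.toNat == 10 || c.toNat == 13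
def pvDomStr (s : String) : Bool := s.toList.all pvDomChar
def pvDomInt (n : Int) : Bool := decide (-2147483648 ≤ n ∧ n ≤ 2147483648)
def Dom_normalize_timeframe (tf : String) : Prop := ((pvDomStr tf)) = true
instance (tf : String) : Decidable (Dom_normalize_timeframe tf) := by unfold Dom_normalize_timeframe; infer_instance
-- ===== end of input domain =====

-- B classifies the stripped lowered string in ONE pass of a 4-state machine (accumulating the
-- digits on the way) instead of A's staged whole-string tests with slicing; same cost, alternative algorithm.
-- Where A raises ValueError (no digit in the stripped string), B raises the same ValueError; Pre_ excludes those inputs.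

-- ===== PORT A =====
def normalize_timeframe (tf : String) : String :=
  let tf := PySem.Str.lower (PySem.Str.strip tf)
  if PySem.Str.strIsdigit tf then tf ++ "m"
  else if (!tf.isEmpty
      && ((PySem.Str.pyGet? tf (-1)).elim false (fun c => c == 'm' || c == 'h' || c == 'd' || c == 'w'))
      && PySem.Str.strIsdigit (PySem.Str.slice tf none (some (-1)))) then tf
  else
    let num := tf.toList.filter PySem.Chars.isdigit
    if !num.isEmpty then String.ofList num ++ "m"
    else ""

-- ===== PORT B =====
-- c in "mhdw"
def nt_isUnit (c : Char) : Bool := c == 'm' || c == 'h' || c == 'd' || c == 'w'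

-- the loop body: state 0 start, 1 digits so far, 2 digits then one unit, 3 broken
def nt_step (acc : Nat × List Char) (c : Char) : Nat × List Char :=
  if PySem.Chars.isdigit c then
    ((if acc.1 == 0 || acc.1 == 1 then 1 else 3), acc.2 ++ [c])
  else if nt_isUnit c && acc.1 == 1 then (2, acc.2)
  else (3, acc.2)

def normalize_timeframe_alt (tf : String) : String :=
  let s := PySem.Str.lower (PySem.Str.strip tf)
  let r := s.toList.foldl nt_step (0, [])
  if r.1 == 1 then String.ofList r.2 ++ "m"
  else if r.1 == 2 then s
  else if !r.2.isEmpty then String.ofList r.2 ++ "m"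
  else ""

-- ===== PRECONDITION & SPEC =====
-- Pre_ excludes exactly the inputs on which the Python A raises ValueError:
-- those whose stripped lowered string contains no digit character (B raises the same error there).
def Pre_normalize_timeframe (tf : String) : Prop :=
  (PySem.Str.lower (PySem.Str.strip tf)).toList.any PySem.Chars.isdigit = true
instance (tf : String) : Decidable (Pre_normalize_timeframe tf) := by
  unfold Pre_normalize_timeframe; infer_instance
def pvWitness_normalize_timeframe : String := "15m"

def Spec_normalize_timeframe (tf : String) (out : String) : Prop := out = normalize_timeframe_alt tf
instance (tf : String) (out : String) : Decidable (Spec_normalize_timeframe tf out) := by unfold Spec_normalize_timeframe; infer_instance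

-- ===== CLAIM (what is proved, stated in full; the proofs are below) =====
def Claim_equal_normalize_timeframe : Prop := ∀ (tf : String), Dom_normalize_timeframe tf → Pre_normalize_timeframe tf → Spec_normalize_timeframe tf (normalize_timeframe tf)

-- ===== LEMMAS AND PROOFS =====
theorem unit_not_digit (u : Char) (hu : nt_isUnit u = true) :
    PySem.Chars.isdigit u = false := by
  simp only [nt_isUnit, Bool.or_eq_true, beq_iff_eq] at hu
  rcases hu with ((h|h)|h)|h <;> subst h <;> decide

-- the digit accumulator of the machine is the digit filter of the input
theorem nt_foldl_snd (l : List Char) (a : Nat × List Char) :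
    (l.foldl nt_step a).2 = a.2 ++ l.filter PySem.Chars.isdigit := by
  induction l generalizing a with
  | nil => simp
  | cons c l ih =>
    rw [List.foldl_cons, ih, List.filter_cons]
    have h2 : (nt_step a c).2 = a.2 ++ (if PySem.Chars.isdigit c then [c] else []) := by
      unfold nt_step; split_ifs <;> simp [*]
    rw [h2]
    split_ifs <;> simp

-- the specification of the machine's final state
def nt_classify (l : List Char) : Nat :=
  if l.isEmpty then 0
  else if l.all PySem.Chars.isdigit then 1
  else if !l.dropLast.isEmpty && l.dropLast.all PySem.Chars.isdigit
      && (l.getLast?.elim false nt_isUnit) then 2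
  else 3

theorem nt_foldl_fst (l : List Char) :
    (l.foldl nt_step (0, [])).1 = nt_classify l := by
  induction l using List.reverseRecOn with
  | nil => simp [nt_classify]
  | append_singleton l c ih =>
    rw [List.foldl_append, List.foldl_cons, List.foldl_nil]
    have hfst : ∀ a : Nat × List Char, (nt_step a c).1 =
        if PySem.Chars.isdigit c then (if a.1 == 0 || a.1 == 1 then 1 else 3)
        else if nt_isUnit c && a.1 == 1 then 2 else 3 := by
      intro a; unfold nt_step; split_ifs <;> rfl
    rw [hfst, ih]
    by_cases hE : l.isEmpty = true
    · have hl : l = [] := by simpa [List.isEmpty_iff] using hE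
      subst hl
      simp only [nt_classify, List.nil_append, List.isEmpty_nil, if_true]
      by_cases hd : PySem.Chars.isdigit c = true
      · simp [hd]
      · simp [hd]
    · have hl : l ≠ [] := by simpa [List.isEmpty_iff] using hE
      by_cases hA : l.all PySem.Chars.isdigit = true
      · -- previous state 1
        have hcl : nt_classify l = 1 := by simp [nt_classify, hE, hA]
        rw [hcl]
        by_cases hd : PySem.Chars.isdigit c = true
        · have hall : (l ++ [c]).all PySem.Chars.isdigit = true := by
            simp [List.all_append, hA, hd]
          simp [nt_classify, hd, hall, hl]
        · have hna : (l ++ [c]).all PySem.Chars.isdigit = false := by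
            simp [List.all_append, hd]
          by_cases hu : nt_isUnit c = true
          · simp [nt_classify, hd, hu, hna, hl, hA, hE]
          · simp [nt_classify, hd, hu, hna, hE]
      · -- previous state 2 or 3: result is 3 either way
        have hcl : nt_classify l = 2 ∨ nt_classify l = 3 := by
          unfold nt_classify
          rw [if_neg hE, if_neg hA]
          split_ifs <;> simp
        have hres : (if PySem.Chars.isdigit c then
            (if nt_classify l == 0 || nt_classify l == 1 then 1 else 3)
            else if nt_isUnit c && nt_classify l == 1 then 2 else 3) = 3 := by
          rcases hcl with h | h <;> rw [h] <;> simp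
        rw [hres]
        have hna : (l ++ [c]).all PySem.Chars.isdigit = false := by
          rcases List.all_eq_false.mp (by simpa using hA) with ⟨x, hx, hxd⟩
          exact List.all_eq_false.mpr ⟨x, List.mem_append_left _ hx, hxd⟩
        simp [nt_classify, hna, hA]

theorem classify_one (l : List Char) :
    nt_classify l = 1 ↔ ((!l.isEmpty) && l.all PySem.Chars.isdigit) = true := by
  unfold nt_classify
  split_ifs with he ha hb <;> simp_all

theorem classify_two (l : List Char) :
    nt_classify l = 2 ↔ ((!l.dropLast.isEmpty) && l.dropLast.all PySem.Chars.isdigit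
      && (l.getLast?.elim false nt_isUnit)) = true := by
  unfold nt_classify
  split_ifs with he ha hb
  · have : l = [] := by simpa [List.isEmpty_iff] using he
    subst this; simp
  · -- all digits: the unit-form condition cannot hold
    constructor
    · intro h; omega
    · intro h
      exfalso
      simp only [Bool.and_eq_true] at h
      obtain ⟨⟨-, -⟩, hu⟩ := h
      cases hg : l.getLast? with
      | none => rw [hg] at hu; simp at hu
      | some u =>
        rw [hg] at hu
        simp only [Option.elim] at hu
        have hmem : u ∈ l := List.mem_of_getLast? hg
        have := (List.all_eq_true.mp ha) u hmem
        rw [unit_not_digit u hu] at this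
        exact absurd this (by simp)
  · simp [hb]
  · simpa using hb

-- A's second branch condition, stated on the list side, is exactly "final state 2"
theorem Acond_iff (s : String) :
    ((!s.isEmpty)
      && ((PySem.Str.pyGet? s (-1)).elim false (fun c => c == 'm' || c == 'h' || c == 'd' || c == 'w'))
      && PySem.Str.strIsdigit (PySem.Str.slice s none (some (-1)))) = true
    ↔ nt_classify s.toList = 2 := by
  rw [classify_two]
  have hget : PySem.Str.pyGet? s (-1) = s.toList.getLast? := by
    rw [PySem.Str.pyGet?_eq, PySem.Chars.pyGet?_eq_listPyGet?, PySem.List.pyGet?_neg_one]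
  have hsl : PySem.Str.strIsdigit (PySem.Str.slice s none (some (-1)))
      = ((!s.toList.dropLast.isEmpty) && s.toList.dropLast.all PySem.Chars.isdigit) := by
    rw [PySem.Str.strIsdigit_eq, PySem.Str.slice_to_neg_one, PySem.Chars.strIsdigit]
  have hie : s.isEmpty = s.toList.isEmpty := by
    rw [Bool.eq_iff_iff, String.isEmpty_iff, List.isEmpty_iff, String.toList_eq_nil_iff]
  rw [hget, hsl, hie]
  have hunit : ∀ o : Option Char,
      (o.elim false (fun c => c == 'm' || c == 'h' || c == 'd' || c == 'w')) = o.elim false nt_isUnit := by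
    intro o; cases o <;> rfl
  rw [hunit]
  constructor
  · intro h
    simp only [Bool.and_eq_true] at h ⊢
    exact ⟨⟨h.2.1, h.2.2⟩, h.1.2⟩
  · intro h
    simp only [Bool.and_eq_true] at h ⊢
    have hl : s.toList ≠ [] := by
      intro hn
      have := h.1.1
      rw [hn] at this; simp at this
    exact ⟨⟨by simpa [List.isEmpty_iff] using hl, h.2⟩, ⟨h.1.1, h.1.2⟩⟩

-- the core equivalence on the stripped lowered string
theorem norm_core (tf : String)
    (h : (PySem.Str.lower (PySem.Str.strip tf)).toList.any PySem.Chars.isdigit = true) :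
    normalize_timeframe tf = normalize_timeframe_alt tf := by
  simp only [normalize_timeframe, normalize_timeframe_alt]
  generalize PySem.Str.lower (PySem.Str.strip tf) = s at h ⊢
  rw [nt_foldl_fst, nt_foldl_snd]
  simp only [List.nil_append]
  have hds : s.toList.filter PySem.Chars.isdigit ≠ [] := by
    simp only [ne_eq, List.filter_eq_nil_iff, not_forall]
    simp only [List.any_eq_true] at h
    obtain ⟨c, hc, hcd⟩ := h
    exact ⟨c, hc, by simp [hcd]⟩
  by_cases h1 : PySem.Str.strIsdigit s = true
  · rw [if_pos h1]
    rw [PySem.Str.strIsdigit_eq, PySem.Chars.strIsdigit] at h1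
    have hcl : nt_classify s.toList = 1 := (classify_one s.toList).mpr h1
    have hfe : s.toList.filter PySem.Chars.isdigit = s.toList := by
      refine List.filter_eq_self.mpr ?_
      rw [Bool.and_eq_true] at h1
      simpa [List.all_eq_true] using h1.2
    rw [hcl, hfe]
    simp [String.ofList_toList]
  · rw [if_neg h1]
    have hne1 : nt_classify s.toList ≠ 1 := by
      intro hc
      apply h1
      rw [PySem.Str.strIsdigit_eq, PySem.Chars.strIsdigit]
      exact (classify_one s.toList).mp hc
    by_cases h2 : ((!s.isEmpty)
      && ((PySem.Str.pyGet? s (-1)).elim false (fun c => c == 'm' || c == 'h' || c == 'd' || c == 'w'))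
      && PySem.Str.strIsdigit (PySem.Str.slice s none (some (-1)))) = true
    · rw [if_pos h2]
      have hcl : nt_classify s.toList = 2 := (Acond_iff s).mp h2
      rw [hcl]
      norm_num
    · rw [if_neg h2]
      have hne2 : nt_classify s.toList ≠ 2 := fun hc => h2 ((Acond_iff s).mpr hc)
      have hB1 : (nt_classify s.toList == 1) = false := by simpa using hne1
      have hB2 : (nt_classify s.toList == 2) = false := by simpa using hne2
      rw [hB1, hB2]
      have hnum : (!(s.toList.filter PySem.Chars.isdigit).isEmpty) = true := by
        simp [List.isEmpty_eq_false_iff, hds]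
      simp only [if_neg (by simp : ¬(false = true)), hnum]

-- ===== VERDICT (by name: the statement is the Claim_ definition above) =====
theorem normalize_timeframe_spec : Claim_equal_normalize_timeframe := by
  intro tf _ h
  unfold Spec_normalize_timeframe
  exact norm_core tf h
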